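-- pv_equiv track=rewrite | github.com/Neylz/mapack | config/parser.py | _strip_jsonc
-- ===== SOURCE A (Python) =====
-- def _strip_jsonc(text: str) -> str:
--     """Remove // and /* */ comments while preserving string literals."""
--     out: list[str] = []
--     i = 0
--     in_string = False
--     string_quote = ""
--     escaped = False
--     in_line_comment = False
--     in_block_comment = False
--
--     while i < len(text):
--         ch = text[i]
--         nxt = text[i + 1] if i + 1 < len(text) else ""
--
--         if in_line_comment:
--             if ch == "\n":
--                 in_line_comment = False
--                 out.append(ch)
--             i += 1
--             continue
--
--         if in_block_comment:
--             if ch == "*" and nxt == "/":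
--                 in_block_comment = False
--                 i += 2
--             else:
--                 i += 1
--             continue
--
--         if in_string:
--             out.append(ch)
--             if escaped:
--                 escaped = False
--             elif ch == "\\":
--                 escaped = True
--             elif ch == string_quote:
--                 in_string = False
--             i += 1
--             continue
--
--         if ch in ('"', "'"):
--             in_string = True
--             string_quote = ch
--             out.append(ch)
--             i += 1
--             continue
--
--         if ch == "/" and nxt == "/":
--             in_line_comment = True
--             i += 2
--             continue
--
--         if ch == "/" and nxt == "*":
--             in_block_comment = True
--             i += 2
--             continue
--
--         out.append(ch)
--         i += 1
--
--     return "".join(out)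
-- ===== SOURCE B (Python) =====
-- def _strip_jsonc(text: str) -> str:
--     """Remove // and /* */ comments while preserving string literals.
--     Chunk-jumping rewrite: no mode flags; strings are copied as slices and
--     comments skipped with find()."""
--     out = []
--     i = 0
--     n = len(text)
--     while i < n:
--         ch = text[i]
--         if ch == '"' or ch == "'":
--             j = i + 1
--             while j < n:
--                 c = text[j]
--                 if c == '\\':
--                     j += 2
--                 elif c == ch:
--                     j += 1
--                     break
--                 else:
--                     j += 1
--             out.append(text[i:j])
--             i = j
--         elif ch == '/' and text[i+1:i+2] == '/':
--             j = text.find('\n', i + 2)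
--             i = n if j == -1 else j
--         elif ch == '/' and text[i+1:i+2] == '*':
--             j = text.find('*/', i + 2)
--             i = n if j == -1 else j + 2
--         else:
--             out.append(ch)
--             i += 1
--     return ''.join(out)
-- ===== Notes on version B (the rewrite author's own statement) =====
-- stated objective: faster
-- what changed: Replaces the per-character boolean state machine (in_string/escaped/in_line_comment/in_block_comment flags) with a flag-free chunk-jumping scanner: a quote copies the whole string literal as one slice, // and /* */ comments are skipped in a single str.find jump, so each outer iteration dispatches on the current character only.
import Mathlib
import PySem

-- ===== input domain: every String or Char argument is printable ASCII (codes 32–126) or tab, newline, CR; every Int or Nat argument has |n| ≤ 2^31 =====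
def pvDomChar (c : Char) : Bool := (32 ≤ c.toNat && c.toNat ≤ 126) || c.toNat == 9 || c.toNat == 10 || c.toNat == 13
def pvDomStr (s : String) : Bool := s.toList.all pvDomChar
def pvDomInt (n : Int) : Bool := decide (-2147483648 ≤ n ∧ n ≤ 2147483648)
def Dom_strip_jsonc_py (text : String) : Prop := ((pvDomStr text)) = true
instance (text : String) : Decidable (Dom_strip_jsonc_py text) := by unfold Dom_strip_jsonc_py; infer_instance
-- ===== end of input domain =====

-- B replaces A's per-character flag state machine with a flag-free chunk-jumping scanner
-- (string literals consumed whole, comments skipped in one jump); same return value.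

-- ===== PORT A =====
-- A's while loop advances i by 1 or 2, so it is recursion on the remaining character
-- list; 'nxt' = text[i+1] is the head of the tail; out is accumulated in reverse.
def goA (cs : List Char) (inStr : Bool) (q : Char) (esc lc bc : Bool) (out : List Char) :
    List Char :=
  match cs with
  | [] => out.reverse
  | ch :: rest =>
    let nxt : Option Char := rest.head?
    if lc then
      if ch = '\n' then goA rest inStr q esc false bc (ch :: out)
      else goA rest inStr q esc lc bc out
    else if bc then
      if ch = '*' ∧ nxt = some '/' then goA rest.tail inStr q esc lc false out
      else goA rest inStr q esc lc bc out
    else if inStr then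
      if esc then goA rest inStr q false lc bc (ch :: out)
      else if ch = '\\' then goA rest inStr q true lc bc (ch :: out)
      else if ch = q then goA rest false q esc lc bc (ch :: out)
      else goA rest inStr q esc lc bc (ch :: out)
    else if ch = '"' ∨ ch = '\'' then goA rest true ch esc lc bc (ch :: out)
    else if ch = '/' ∧ nxt = some '/' then goA rest.tail inStr q esc true bc out
    else if ch = '/' ∧ nxt = some '*' then goA rest.tail inStr q esc lc true out
    else goA rest inStr q esc lc bc (ch :: out)
termination_by cs.length
decreasing_by all_goals (simp [List.length_tail]; try omega)

def strip_jsonc_py (text : String) : String :=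
  String.ofList (goA text.toList false ' ' false false false [])

-- ===== PORT B =====
-- Source B inner j-loop: consume a string body opened by quote q -> (chunk, rest); backslash skips two chars (j += 2)
def scanStrB (q : Char) (cs : List Char) : List Char × List Char :=
  match cs with
  | [] => ([], [])
  | c :: rest =>
    if c = '\\' then
      match rest with
      | [] => ([c], [])
      | d :: r2 => let p := scanStrB q r2; (c :: d :: p.1, p.2)
    else if c = q then ([c], rest)
    else let p := scanStrB q rest; (c :: p.1, p.2)

def dropLineB (cs : List Char) : List Char := cs.dropWhile (· ≠ '\n')

def dropBlockB : List Char → List Char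
  | [] => []
  | '*' :: '/' :: r => r
  | _ :: r => dropBlockB r

theorem scanStrB_len (q : Char) (cs : List Char) : (scanStrB q cs).2.length ≤ cs.length := by
  match cs with
  | [] => simp [scanStrB]
  | c :: rest =>
    rw [scanStrB.eq_def]
    by_cases h1 : c = '\\'
    · subst h1
      match rest with
      | [] => simp
      | d :: r2 =>
        have ih := scanStrB_len q r2
        simp
        omega
    · by_cases h2 : c = q
      · subst h2
        simp [h1]
      · have ih := scanStrB_len q rest
        simp [h1, h2]
        omega
termination_by cs.length

theorem dropBlockB_len (cs : List Char) : (dropBlockB cs).length ≤ cs.length := by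
  induction cs using dropBlockB.induct <;> simp_all [dropBlockB] <;> omega

def goB (cs : List Char) : List Char :=
  match cs with
  | [] => []
  | ch :: rest =>
    if ch = '"' ∨ ch = '\'' then
      let p := scanStrB ch rest
      ch :: p.1 ++ goB p.2
    else if ch = '/' ∧ rest.head? = some '/' then goB (dropLineB rest.tail)
    else if ch = '/' ∧ rest.head? = some '*' then goB (dropBlockB rest.tail)
    else ch :: goB rest
termination_by cs.length
decreasing_by
  · have := scanStrB_len ch rest; simp; omega
  · have h1 := (List.dropWhile_sublist (l := rest.tail) (p := (· ≠ '\n'))).length_le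
    simp only [ne_eq, decide_not] at h1
    have h2 : rest.tail.length ≤ rest.length := by cases rest <;> simp
    simp [dropLineB]; omega
  · have h1 := dropBlockB_len rest.tail
    have h2 : rest.tail.length ≤ rest.length := by cases rest <;> simp
    simp; omega
  · simp

def strip_jsonc_py_alt (text : String) : String := String.ofList (goB text.toList)

-- ===== PRECONDITION & SPEC =====
def Spec_strip_jsonc_py (text : String) (out : String) : Prop := out = strip_jsonc_py_alt text
instance (text : String) (out : String) : Decidable (Spec_strip_jsonc_py text out) := by unfold Spec_strip_jsonc_py; infer_instance

-- ===== CLAIM (what is proved, stated in full; the proofs are below) =====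
def Claim_equal_strip_jsonc_py : Prop := ∀ (text : String), Dom_strip_jsonc_py text → Spec_strip_jsonc_py text (strip_jsonc_py text)

-- ===== LEMMAS AND PROOFS =====

theorem scanStrB_esc (q d : Char) (r2 : List Char) :
    scanStrB q ('\\' :: d :: r2) = ('\\' :: d :: (scanStrB q r2).1, (scanStrB q r2).2) := by
  rw [scanStrB.eq_def]; simp

theorem scanStrB_close (q : Char) (rest : List Char) (h1 : ¬q = '\\') :
    scanStrB q (q :: rest) = ([q], rest) := by
  rw [scanStrB.eq_def]; simp [h1]

theorem scanStrB_other (q c : Char) (rest : List Char) (h1 : ¬c = '\\') (h2 : ¬c = q) :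
    scanStrB q (c :: rest) = (c :: (scanStrB q rest).1, (scanStrB q rest).2) := by
  rw [scanStrB.eq_def]; simp [h1, h2]


theorem dropBlockB_cons_ne (ch : Char) (rest : List Char)
    (h : ¬(ch = '*' ∧ rest.head? = some '/')) : dropBlockB (ch :: rest) = dropBlockB rest := by
  rw [dropBlockB.eq_def]; split <;> simp_all

theorem goA_modes (n : ℕ) : ∀ cs : List Char, cs.length ≤ n → ∀ q : Char, ∀ out : List Char,
    (goA cs false q false false false out = out.reverse ++ goB cs)
    ∧ (goA cs true q false false false out
        = out.reverse ++ (scanStrB q cs).1 ++ goB (scanStrB q cs).2)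
    ∧ (goA cs false q false true false out = out.reverse ++ goB (dropLineB cs))
    ∧ (goA cs false q false false true out = out.reverse ++ goB (dropBlockB cs)) := by
  induction n with
  | zero =>
    intro cs hcs q out
    have h0 : cs = [] := List.length_eq_zero_iff.mp (Nat.le_zero.mp hcs)
    subst h0
    simp [goA, goB, scanStrB, dropLineB, dropBlockB]
  | succ n ih =>
    intro cs hcs q out
    cases cs with
    | nil => simp [goA, goB, scanStrB, dropLineB, dropBlockB]
    | cons ch rest =>
      have hr : rest.length ≤ n := by simp at hcs; omega
      have hrt : rest.tail.length ≤ n := by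
        have : rest.tail.length ≤ rest.length := by cases rest <;> simp
        omega
      refine ⟨?_, ?_, ?_, ?_⟩
      · -- neutral mode
        rw [goA]
        by_cases hq : ch = '"' ∨ ch = '\''
        · obtain h | h := hq <;> subst h
          · have hS := (ih rest hr '"' ('"' :: out)).2.1
            simp [goB, hS]
          · have hS := (ih rest hr '\'' ('\'' :: out)).2.1
            simp [goB, hS]
        · by_cases hl : ch = '/' ∧ rest.head? = some '/'
          · have hL := (ih rest.tail hrt q out).2.2.1
            simp [goB, hl, hL]
          · by_cases hb : ch = '/' ∧ rest.head? = some '*'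
            · have hB := (ih rest.tail hrt q out).2.2.2
              simp [goB, hb, hB]
            · have hN := (ih rest hr q (ch :: out)).1
              simp [goB, hq, hl, hb, hN]
      · -- string mode
        rw [goA]
        by_cases h1 : ch = '\\'
        · subst h1
          cases rest with
          | nil => simp [goA, scanStrB, goB]
          | cons d r2 =>
            have hS := (ih r2 (by simp at hcs; omega) q (d :: '\\' :: out)).2.1
            simp [goA, scanStrB_esc, hS]
        · by_cases h2 : ch = q
          · subst h2
            have hN1 := (ih rest hr ch (ch :: out)).1
            simp [scanStrB_close ch rest h1, h1, hN1]
          · have hS := (ih rest hr q (ch :: out)).2.1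
            simp [scanStrB_other q ch rest h1 h2, h1, h2, hS]
      · -- line comment mode
        rw [goA]
        by_cases h : ch = '\n'
        · subst h
          have hN := (ih rest hr q ('\n' :: out)).1
          simp [dropLineB, goB, hN]
        · have hL := (ih rest hr q out).2.2.1
          simp [dropLineB, h, hL]
      · -- block comment mode
        rw [goA]
        by_cases h : ch = '*' ∧ rest.head? = some '/'
        · obtain ⟨h1, h2⟩ := h; subst h1
          cases rest with
          | nil => simp at h2
          | cons d r =>
            simp at h2; subst h2
            have hN := (ih r (by simp at hcs; omega) q out).1
            simp [dropBlockB, hN]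
        · have hB := (ih rest hr q out).2.2.2
          simp [h, hB, dropBlockB_cons_ne ch rest h]


-- ===== VERDICT (by name: the statement is the Claim_ definition above) =====
theorem strip_jsonc_py_spec : Claim_equal_strip_jsonc_py := by
  intro text _
  unfold Spec_strip_jsonc_py strip_jsonc_py strip_jsonc_py_alt
  have h := (goA_modes text.toList.length text.toList le_rfl ' ' []).1
  simpa using congrArg String.ofList h
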